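-- pv_equiv track=rewrite | github.com/CaptainTralfaz/Cavern | quadlife.py | furthest_candidate_from_all_seeds
-- ===== SOURCE A (Python) =====
-- def furthest_candidate_from_all_seeds(seeds, candidates):
--     """
--     Returns the candidate coordinate that is the farthest in distance from all seeds
--     :param seeds: list of int x y coordinate tuples
--     :param candidates: list of int x y coordinate tuples
--     :return: tuple x y int coordinates
--     """
--     furthest_dist = 0
--     furthest_candidate = (None, None)
--     for (x1, y1) in candidates:
--         current_dist = 0
--         for (x2, y2) in seeds:
--             current_dist += distance_to(x1, y1, x2, y2)
--             if current_dist > furthest_dist: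
--                 furthest_dist = current_dist
--                 furthest_candidate = (x1, y1)
--     return furthest_candidate
--
-- def distance_to(x1, y1, x2, y2):
--     """
--     Sum the difference between two points
--     :param x1: point 1 x coord
--     :param y1: point 1 y coord
--     :param x2: point 2 x coord
--     :param y2: point 2 y coord
--     :return: int orthogonal distance
--     """
--     dx = abs(x1 - x2)
--     dy = abs(y1 - y2)
--     return dx + dy
-- ===== SOURCE B (Python) =====
-- def _bisect_right(a, v):
--     """bisect.bisect_right re-written locally (A imports nothing, so no stdlib import)."""
--     lo, hi = 0, len(a)
--     while lo < hi:
--         mid = (lo + hi) // 2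
--         if v < a[mid]:
--             hi = mid
--         else:
--             lo = mid + 1
--     return lo
--
--
-- def furthest_candidate_from_all_seeds(seeds, candidates):
--     """
--     Same result as A, but O((C+S) log S): sort the seed x- and y-coordinates once,
--     build prefix sums, and evaluate each candidate's total Manhattan distance with
--     two binary searches instead of a scan over all seeds.
--     """
--     xs = sorted([x for (x, _) in seeds])
--     ys = sorted([y for (_, y) in seeds])
--     n = len(xs)
--     px = [0]
--     s = 0
--     for v in xs:
--         s += v
--         px.append(s)
--     py = [0]
--     s = 0
--     for v in ys:
--         s += v
--         py.append(s)
--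
--     def axis_sum(vals, prefix, v):
--         k = _bisect_right(vals, v)
--         return k * v - prefix[k] + (prefix[n] - prefix[k]) - (n - k) * v
--
--     best = 0
--     res = (None, None)
--     for (x, y) in candidates:
--         d = axis_sum(xs, px, x) + axis_sum(ys, py, y)
--         if d > best:
--             best = d
--             res = (x, y)
--     return res
-- ===== Notes on version B (the rewrite author's own statement) =====
-- stated objective: faster
-- what changed: Replaces the per-candidate scan over all seeds by sorting the seed x- and y-coordinates once with prefix sums, then evaluating each candidate's total Manhattan distance with two binary searches.
import Mathlib
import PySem

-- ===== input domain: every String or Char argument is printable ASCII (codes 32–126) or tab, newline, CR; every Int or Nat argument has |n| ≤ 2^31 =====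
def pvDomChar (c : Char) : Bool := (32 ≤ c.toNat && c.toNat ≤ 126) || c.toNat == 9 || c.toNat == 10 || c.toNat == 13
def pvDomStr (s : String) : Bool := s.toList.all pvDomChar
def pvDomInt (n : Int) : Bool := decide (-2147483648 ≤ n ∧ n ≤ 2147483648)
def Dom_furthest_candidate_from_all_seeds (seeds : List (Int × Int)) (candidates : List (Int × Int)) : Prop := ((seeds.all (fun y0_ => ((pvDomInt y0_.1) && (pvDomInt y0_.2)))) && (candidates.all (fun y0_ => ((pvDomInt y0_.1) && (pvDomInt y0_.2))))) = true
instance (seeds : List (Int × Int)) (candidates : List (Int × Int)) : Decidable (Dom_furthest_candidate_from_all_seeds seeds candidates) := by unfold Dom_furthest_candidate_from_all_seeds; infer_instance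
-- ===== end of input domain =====

-- ===== PORT A =====
-- B replaces A's per-candidate scan over all seeds by sorted coordinates + prefix
-- sums + binary search (objective: faster; return value only, nothing is mutated).
def distance_to (x1 y1 x2 y2 : Int) : Int :=
  |x1 - x2| + |y1 - y2|

def furthest_candidate_from_all_seeds (seeds : List (Int × Int)) (candidates : List (Int × Int)) : Option Int × Option Int :=
  (candidates.foldl (fun (st : Int × (Option Int × Option Int)) c =>
    let inner := seeds.foldl (fun (s : Int × Int × (Option Int × Option Int)) p =>
      let cur := s.1 + distance_to c.1 c.2 p.1 p.2
      if cur > s.2.1 then (cur, cur, (some c.1, some c.2)) else (cur, s.2.1, s.2.2))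
      (0, st.1, st.2)
    (inner.2.1, inner.2.2)) (0, ((none : Option Int), (none : Option Int)))).2

-- ===== PORT B =====
-- Source B's hand-written `_bisect_right` is CPython's bisect_right loop; ported as the
-- prelude's primitive for it, PySem.List.bisectRight (same algorithm).
-- `prefix[k]` / `prefix[n]`: k ≤ n = prefix.length - 1 always, so getD is exact here.
def bAxisSum (vals prefixSums : List Int) (n : Nat) (v : Int) : Int :=
  let k := PySem.List.bisectRight vals v
  (k : Int) * v - prefixSums.getD k 0 + (prefixSums.getD n 0 - prefixSums.getD k 0)
    - ((n : Int) - (k : Int)) * v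

def furthest_candidate_from_all_seeds_alt (seeds : List (Int × Int)) (candidates : List (Int × Int)) : Option Int × Option Int :=
  let xs := PySem.List.sorted (seeds.map (fun p => p.1)) (fun x => x)
  let ys := PySem.List.sorted (seeds.map (fun p => p.2)) (fun x => x)
  let n := xs.length
  let px := (xs.foldl (fun (acc : List Int × Int) v => (acc.1 ++ [acc.2 + v], acc.2 + v)) ([0], 0)).1
  let py := (ys.foldl (fun (acc : List Int × Int) v => (acc.1 ++ [acc.2 + v], acc.2 + v)) ([0], 0)).1
  (candidates.foldl (fun (st : Int × (Option Int × Option Int)) c =>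
    let d := bAxisSum xs px n c.1 + bAxisSum ys py n c.2
    if d > st.1 then (d, (some c.1, some c.2)) else st)
    (0, ((none : Option Int), (none : Option Int)))).2

-- ===== PRECONDITION & SPEC =====
def Spec_furthest_candidate_from_all_seeds (seeds : List (Int × Int)) (candidates : List (Int × Int)) (out : Option Int × Option Int) : Prop := out = furthest_candidate_from_all_seeds_alt seeds candidates
instance (seeds : List (Int × Int)) (candidates : List (Int × Int)) (out : Option Int × Option Int) : Decidable (Spec_furthest_candidate_from_all_seeds seeds candidates out) := by unfold Spec_furthest_candidate_from_all_seeds; infer_instance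

-- ===== CLAIM (what is proved, stated in full; the proofs are below) =====
def Claim_equal_furthest_candidate_from_all_seeds : Prop := ∀ (seeds : List (Int × Int)) (candidates : List (Int × Int)), Dom_furthest_candidate_from_all_seeds seeds candidates → Spec_furthest_candidate_from_all_seeds seeds candidates (furthest_candidate_from_all_seeds seeds candidates)

-- ===== LEMMAS AND PROOFS =====

-- total Manhattan distance from candidate c to all seeds (A's effective per-candidate value)
def totalDist (seeds : List (Int × Int)) (c : Int × Int) : Int :=
  (seeds.map (fun p => |c.1 - p.1| + |c.2 - p.2|)).sum

theorem totalDist_nonneg (seeds : List (Int × Int)) (c : Int × Int) : 0 ≤ totalDist seeds c := by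
  apply List.sum_nonneg
  intro x hx
  obtain ⟨p, _, rfl⟩ := List.mem_map.mp hx
  positivity

-- A's inner loop from a state with cur ≤ fd: running sum plus a strict-max update
theorem innerLoop_eq (c : Int × Int) (seeds : List (Int × Int)) (cur fd : Int)
    (fc : Option Int × Option Int) (hcf : cur ≤ fd) :
    seeds.foldl (fun (s : Int × Int × (Option Int × Option Int)) p =>
      let cur' := s.1 + distance_to c.1 c.2 p.1 p.2
      if cur' > s.2.1 then (cur', cur', (some c.1, some c.2)) else (cur', s.2.1, s.2.2))
      (cur, fd, fc)
    = (cur + totalDist seeds c,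
        if fd < cur + totalDist seeds c then (cur + totalDist seeds c, (some c.1, some c.2))
        else (fd, fc)) := by
  induction seeds generalizing cur fd fc with
  | nil =>
    simp only [List.foldl_nil, totalDist, List.map_nil, List.sum_nil, add_zero]
    rw [if_neg (by omega)]
  | cons p rest ih =>
    simp only [List.foldl_cons]
    have hd : (0:Int) ≤ distance_to c.1 c.2 p.1 p.2 := by
      unfold distance_to; positivity
    have hT : totalDist (p :: rest) c
        = distance_to c.1 c.2 p.1 p.2 + totalDist rest c := by
      simp [totalDist, distance_to]
    have hr := totalDist_nonneg rest c
    set d := distance_to c.1 c.2 p.1 p.2 with hdd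
    set Tr := totalDist rest c with hTr
    rw [hT]
    have hassoc : cur + (d + Tr) = cur + d + Tr := by ring
    rw [hassoc]
    by_cases h : cur + d > fd
    · rw [if_pos h, ih _ _ _ (le_refl _)]
      by_cases h2 : cur + d < cur + d + Tr
      · rw [if_pos h2, if_pos (show fd < cur + d + Tr by omega)]
      · rw [if_neg h2]
        have h3 : Tr = 0 := by omega
        rw [if_pos (show fd < cur + d + Tr by omega)]
        simp [h3]
    · rw [if_neg h, ih _ _ _ (by omega)]

-- A's outer loop reduced to a selection fold over per-candidate totals
theorem outer_eq (seeds : List (Int × Int)) (candidates : List (Int × Int))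
    (st : Int × (Option Int × Option Int)) (h0 : 0 ≤ st.1) :
    candidates.foldl (fun (st : Int × (Option Int × Option Int)) c =>
      let inner := seeds.foldl (fun (s : Int × Int × (Option Int × Option Int)) p =>
        let cur := s.1 + distance_to c.1 c.2 p.1 p.2
        if cur > s.2.1 then (cur, cur, (some c.1, some c.2)) else (cur, s.2.1, s.2.2))
        (0, st.1, st.2)
      (inner.2.1, inner.2.2)) st
    = candidates.foldl (fun (st : Int × (Option Int × Option Int)) c =>
        if st.1 < totalDist seeds c then (totalDist seeds c, (some c.1, some c.2)) else st) st := by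
  induction candidates generalizing st with
  | nil => rfl
  | cons c cs ih =>
    simp only [List.foldl_cons]
    rw [innerLoop_eq c seeds 0 st.1 st.2 h0]
    simp only [zero_add]
    by_cases h : st.1 < totalDist seeds c
    · simp only [h, if_pos]
      exact ih _ (by have := totalDist_nonneg seeds c; simp; omega)
    · simp only [h, if_neg, not_false_iff]
      exact ih st h0

-- sum of (v - e) over a list of ints
theorem sum_map_vsub (t : List Int) (v : Int) :
    (t.map (fun e => v - e)).sum = (t.length : Int) * v - t.sum := by
  induction t with
  | nil => simp
  | cons a r ih => simp [ih]; ring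

-- sum of (e - v) over a list of ints
theorem sum_map_subv (t : List Int) (v : Int) :
    (t.map (fun e => e - v)).sum = t.sum - (t.length : Int) * v := by
  induction t with
  | nil => simp
  | cons a r ih => simp [ih]; ring

-- the prefix-sum builder: fold state .1 accumulates partial sums
def partialSums : List Int → Int → List Int
  | [], _ => []
  | v :: r, t => (t + v) :: partialSums r (t + v)

theorem prefix_fold_eq (s : List Int) (a : List Int) (t : Int) :
    (s.foldl (fun (acc : List Int × Int) v => (acc.1 ++ [acc.2 + v], acc.2 + v)) (a, t))
    = (a ++ partialSums s t, t + s.sum) := by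
  induction s generalizing a t with
  | nil => simp [partialSums]
  | cons v r ih =>
    simp only [List.foldl_cons, partialSums]
    rw [ih]
    simp
    omega

theorem partialSums_getD (s : List Int) (t : Int) (j : Nat) (hj : j ≤ s.length) :
    (t :: partialSums s t).getD j 0 = t + (s.take j).sum := by
  induction s generalizing t j with
  | nil =>
    match j with
    | 0 => simp
    | j + 1 => simp at hj
  | cons v r ih =>
    match j with
    | 0 => simp
    | j + 1 =>
      simp only [partialSums, List.getD_cons_succ, List.take_succ_cons, List.sum_cons]
      rw [ih (t + v) j (by simpa using hj)]
      omega

-- elements of take k / drop k at the bisection point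
theorem take_le_of_bisect (s : List Int) (v : Int) (hs : s.Pairwise (· ≤ ·))
    (e : Int) (he : e ∈ s.take (PySem.List.bisectRight s v)) : e ≤ v := by
  obtain ⟨j, hj, rfl⟩ := List.getElem_of_mem he
  have hjk : j < PySem.List.bisectRight s v := by
    simp [List.length_take] at hj; omega
  have hjl : j < s.length := by
    simp [List.length_take] at hj; omega
  rw [List.getElem_take]
  exact (PySem.List.bisectRight_spec s v hs).2.1 j hjl hjk

theorem drop_gt_of_bisect (s : List Int) (v : Int) (hs : s.Pairwise (· ≤ ·))
    (e : Int) (he : e ∈ s.drop (PySem.List.bisectRight s v)) : v < e := by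
  obtain ⟨j, hj, rfl⟩ := List.getElem_of_mem he
  have hl : PySem.List.bisectRight s v + j < s.length := by
    simp [List.length_drop] at hj; omega
  rw [List.getElem_drop]
  exact (PySem.List.bisectRight_spec s v hs).2.2 _ hl (Nat.le_add_right _ _)

-- B's axis formula computes the sum of |v - e| over the (unsorted) coordinate list
theorem axis_sum_eq (l : List Int) (v : Int) :
    bAxisSum (PySem.List.sorted l (fun x => x))
      ((PySem.List.sorted l (fun x => x)).foldl
        (fun (acc : List Int × Int) w => (acc.1 ++ [acc.2 + w], acc.2 + w)) ([0], 0)).1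
      l.length v
    = (l.map (fun e => |v - e|)).sum := by
  set s := PySem.List.sorted l (fun x => x) with hsdef
  have hperm : s.Perm l := PySem.List.sorted_perm l (fun x => x) false
  have hlen : s.length = l.length := hperm.length_eq
  have hs : s.Pairwise (· ≤ ·) := by
    have := PySem.List.sorted_pairwise l (fun x => x)
    simpa using this
  have hsum : (l.map (fun e => |v - e|)).sum = (s.map (fun e => |v - e|)).sum :=
    (List.Perm.sum_eq ((hperm.map _))).symm
  rw [hsum]
  unfold bAxisSum
  rw [prefix_fold_eq]
  set k := PySem.List.bisectRight s v with hk
  have hkle : k ≤ s.length := (PySem.List.bisectRight_spec s v hs).1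
  simp only [List.singleton_append]
  rw [partialSums_getD s 0 k (by omega), partialSums_getD s 0 l.length (by omega)]
  rw [show s.take l.length = s from List.take_of_length_le (by omega)]
  have habs : (s.map (fun e => |v - e|)).sum
      = ((s.take k).map (fun e => v - e)).sum + ((s.drop k).map (fun e => e - v)).sum := by
    conv_lhs => rw [(List.take_append_drop k s).symm]
    rw [List.map_append, List.sum_append]
    congr 1
    · apply congrArg
      apply List.map_congr_left
      intro e he
      have := take_le_of_bisect s v hs e he
      rw [abs_of_nonneg (by omega)]
    · apply congrArg
      apply List.map_congr_left
      intro e he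
      have := drop_gt_of_bisect s v hs e he
      rw [abs_of_nonpos (by omega)]
      omega
  rw [habs, sum_map_vsub, sum_map_subv]
  have htk : (s.take k).length = k := by simp [List.length_take]; omega
  have hds : (s.take k).sum + (s.drop k).sum = s.sum := List.sum_take_add_sum_drop s k
  have hdl : (s.drop k).length = s.length - k := List.length_drop
  rw [htk, hdl]
  have hcast : ((s.length - k : Nat) : Int) = (l.length : Int) - (k : Int) := by omega
  rw [hcast]
  have : (s.drop k).sum = s.sum - (s.take k).sum := by omega
  rw [this]
  ring

-- the two selection folds agree once the per-candidate values agree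
theorem select_fold_congr (cands : List (Int × Int))
    (f g : (Int × Int) → Int) (hfg : ∀ c, f c = g c)
    (st : Int × (Option Int × Option Int)) :
    cands.foldl (fun st c => if g c > st.1 then (g c, (some c.1, some c.2)) else st) st
    = cands.foldl (fun st c => if st.1 < f c then (f c, (some c.1, some c.2)) else st) st := by
  have : f = g := funext hfg
  subst this
  rfl

-- ===== VERDICT (by name: the statement is the Claim_ definition above) =====
theorem furthest_candidate_from_all_seeds_spec : Claim_equal_furthest_candidate_from_all_seeds := by
  intro seeds candidates _
  unfold Spec_furthest_candidate_from_all_seeds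
  unfold furthest_candidate_from_all_seeds
  rw [outer_eq seeds candidates (0, (none, none)) (by simp)]
  unfold furthest_candidate_from_all_seeds_alt
  simp only []
  congr 1
  refine (select_fold_congr candidates (totalDist seeds) _ ?_ _).symm
  intro c
  have hx := axis_sum_eq (seeds.map (fun p => p.1)) c.1
  have hy := axis_sum_eq (seeds.map (fun p => p.2)) c.2
  simp only [List.length_map] at hx hy
  have hlen1 : (PySem.List.sorted (seeds.map (fun p => p.1)) (fun x => x)).length = seeds.length := by
    rw [(PySem.List.sorted_perm (seeds.map (fun p => p.1)) (fun x => x) false).length_eq]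
    simp
  rw [hlen1, hx, hy]
  unfold totalDist
  rw [List.map_map, List.map_map]
  simp only [Function.comp_def]
  exact PySem.List.sum_map_add_int seeds (fun p => |c.1 - p.1|) (fun p => |c.2 - p.2|)
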